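-- pv_equiv track=rewrite | github.com/GBruening/succes_predictor | flask1/DashApps/single_guild_plotting2.py | listify_pulls
-- ===== SOURCE A (Python) =====
-- def listify_pulls(end_perc2):
--     pull_list = []
--
--     n_fights = 10
--
--     pulls_ml = [100]*n_fights
--     for k in range(len(end_perc2)-1):
--         if k == 0:
--             pass
--         else:
--             pulls_ml.pop(0)
--             pulls_ml.append(end_perc2[k])
--         pull_list.append(pulls_ml.copy())
--     return pull_list
-- ===== SOURCE B (Python) =====
-- def listify_pulls(end_perc2):
--     seq = [100] * 10 + list(end_perc2[1:])
--     return [seq[k:k + 10] for k in range(len(end_perc2) - 1)]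
-- ===== Notes on version B (the rewrite author's own statement) =====
-- stated objective: simpler
-- what changed: Builds the full padded sequence once and slices each window out of it, instead of maintaining a mutable 10-element window with pop(0)/append and a k==0 special case.
import Mathlib
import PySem

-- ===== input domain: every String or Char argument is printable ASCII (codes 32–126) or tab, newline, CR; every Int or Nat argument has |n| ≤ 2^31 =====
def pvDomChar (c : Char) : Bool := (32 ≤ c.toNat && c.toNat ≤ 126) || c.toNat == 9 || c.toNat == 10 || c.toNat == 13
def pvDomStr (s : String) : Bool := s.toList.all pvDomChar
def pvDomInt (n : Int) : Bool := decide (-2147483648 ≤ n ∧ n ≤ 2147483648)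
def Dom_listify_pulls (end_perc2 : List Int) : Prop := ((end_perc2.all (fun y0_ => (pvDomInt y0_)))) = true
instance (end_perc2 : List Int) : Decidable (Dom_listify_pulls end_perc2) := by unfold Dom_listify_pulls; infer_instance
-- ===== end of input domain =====

-- B builds the padded sequence once and slices each window out of it; A maintains a
-- mutable 10-element window with pop(0)/append and a k==0 special case. Return values agree everywhere.

-- ===== PORT A =====
-- loop body of A's for-loop: state = (pulls_ml, pull_list); the unreachable fallback arm
-- covers pop/index failures Python could raise but never reaches here (window is always
-- length 10 and k < len(end_perc2)).
def pvStepA (end_perc2 : List Int) (st : List Int × List (List Int)) (k : Int) :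
    List Int × List (List Int) :=
  if k = 0 then (st.1, st.2 ++ [st.1])
  else
    match PySem.List.pop? st.1 0, PySem.List.pyGet? end_perc2 k with
    | some (_, rest), some v => (rest ++ [v], st.2 ++ [rest ++ [v]])
    | _, _ => (st.1, st.2 ++ [st.1])

def listify_pulls (end_perc2 : List Int) : List (List Int) :=
  let n_fights : Nat := 10
  let pulls_ml : List Int := List.replicate n_fights 100
  ((PySem.List.pyRange 0 ((end_perc2.length : Int) - 1) 1).foldl
    (pvStepA end_perc2) (pulls_ml, [])).2

-- ===== PORT B =====
def listify_pulls_alt (end_perc2 : List Int) : List (List Int) :=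
  let seq : List Int := List.replicate 10 100 ++ PySem.List.slice end_perc2 (some 1) none
  (PySem.List.pyRange 0 ((end_perc2.length : Int) - 1) 1).map
    (fun k => PySem.List.slice seq (some k) (some (k + 10)))

-- ===== PRECONDITION & SPEC =====
def Spec_listify_pulls (end_perc2 : List Int) (out : List (List Int)) : Prop := out = listify_pulls_alt end_perc2
instance (end_perc2 : List Int) (out : List (List Int)) : Decidable (Spec_listify_pulls end_perc2 out) := by unfold Spec_listify_pulls; infer_instance

-- ===== CLAIM (what is proved, stated in full; the proofs are below) =====
def Claim_equal_listify_pulls : Prop := ∀ (end_perc2 : List Int), Dom_listify_pulls end_perc2 → Spec_listify_pulls end_perc2 (listify_pulls end_perc2)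

-- ===== LEMMAS AND PROOFS =====

-- the padded sequence and the k-th window (proof-side characterisation of both programs)
def pvSeq (l : List Int) : List Int := List.replicate 10 100 ++ l.tail
def pvWin (l : List Int) (k : Nat) : List Int := ((pvSeq l).drop k).take 10

lemma pvWin_zero (l : List Int) : pvWin l 0 = List.replicate 10 100 := by
  simp [pvWin, pvSeq]

lemma pvWin_length (l : List Int) (k : Nat) (hk : k < l.length) :
    (pvWin l k).length = 10 := by
  have hs : (pvSeq l).length = 10 + (l.length - 1) := by simp [pvSeq]; omega
  rw [pvWin, List.length_take, List.length_drop, hs]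
  omega

lemma pvWin_succ (l : List Int) (m : Nat) (h1 : 1 ≤ m) (h2 : m < l.length) :
    (pvWin l (m - 1)).tail ++ [l[m]'h2] = pvWin l m := by
  have hgot9 : ((pvSeq l).drop m)[9]? = some (l[m]'h2) := by
    rw [List.getElem?_drop]
    show (List.replicate 10 (100 : Int) ++ l.tail)[m + 9]? = _
    rw [List.getElem?_append_right (by simp; omega)]
    simp only [List.length_replicate]
    rw [show m + 9 - 10 = m - 1 by omega, List.getElem?_tail,
      show m - 1 + 1 = m by omega]
    exact List.getElem?_eq_getElem h2
  unfold pvWin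
  have hTT : (((pvSeq l).drop (m - 1)).take 10).tail = ((pvSeq l).drop m).take 9 := by
    rw [← List.drop_one, List.drop_take, List.drop_drop,
      show m - 1 + 1 = m by omega]
  rw [hTT, show (10 : Nat) = 9 + 1 by omega,
    List.take_add_one (l := (pvSeq l).drop m) (i := 9), hgot9]
  rfl

-- loop invariant for A's fold over range(len-1)
lemma pvLoopA (l : List Int) (m : Nat) (hm : m ≤ l.length - 1) :
    ((List.range m).map (fun k => ((k : Nat) : Int))).foldl (pvStepA l)
      (List.replicate 10 100, []) = (pvWin l (m - 1), (List.range m).map (pvWin l)) := by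
  induction m with
  | zero => simp [pvWin_zero]
  | succ m ih =>
    have hm' : m ≤ l.length - 1 := by omega
    rw [List.range_succ, List.map_append, List.foldl_append, ih hm']
    simp only [List.map_cons, List.map_nil, List.foldl_cons, List.foldl_nil]
    by_cases h0 : m = 0
    · subst h0
      simp [pvStepA, pvWin_zero]
    · have h1 : 1 ≤ m := by omega
      have h2 : m < l.length := by omega
      have hne : pvWin l (m - 1) ≠ [] := by
        have := pvWin_length l (m - 1) (by omega)
        intro h; rw [h] at this; simp at this
      obtain ⟨x, xs, hcons⟩ := List.exists_cons_of_ne_nil hne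
      have hget : PySem.List.pyGet? l ((m : Nat) : Int) = some (l[m]'h2) := by
        rw [PySem.List.pyGet?_natCast, List.getElem?_eq_getElem h2]
      have hk0 : ((m : Nat) : Int) ≠ 0 := by exact_mod_cast h0
      have hxs : xs ++ [l[m]'h2] = pvWin l m := by
        have := pvWin_succ l m h1 h2
        rw [hcons] at this
        simpa using this
      simp only [pvStepA, hk0, if_false, hcons, PySem.List.pop?_zero_cons, hget]
      rw [Nat.add_sub_cancel]
      simp [hxs]

lemma pvAltWin (l : List Int) (k : Nat) :
    PySem.List.slice (pvSeq l) (some ((k : Nat) : Int)) (some (((k : Nat) : Int) + 10)) =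
      pvWin l k := by
  have h10 : ((k : Nat) : Int) + 10 = ((k : Nat) : Int) + ((10 : Nat) : Int) := by norm_num
  rw [h10, PySem.List.slice_natCast_add]
  rfl

-- ===== VERDICT (by name: the statement is the Claim_ definition above) =====
theorem listify_pulls_spec : Claim_equal_listify_pulls := by
  intro l _
  unfold Spec_listify_pulls listify_pulls listify_pulls_alt
  have hseq : List.replicate 10 (100 : Int) ++ PySem.List.slice l (some 1) none = pvSeq l := by
    rw [PySem.List.slice_from_one]; rfl
  rw [hseq, PySem.List.pyRange_one]
  simp only [zero_add, Int.sub_zero]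
  have htn : (((l.length : Int) - 1)).toNat = l.length - 1 := by omega
  rw [htn]
  have := pvLoopA l (l.length - 1) (le_refl _)
  rw [this]
  show List.map (pvWin l) _ = _
  rw [List.map_map]
  apply List.map_congr_left
  intro k hk
  exact (pvAltWin l k).symm
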